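-- pv_equiv track=rewrite | github.com/Konrad6487/PokerOddsCalculator | poker_odds_calculator.py | everyBoard
-- ===== SOURCE A (Python) =====
-- def everyBoard(cardList):
--     #return list(combinations(cardList, 5))
--     boards = []
--     board = []
--     for i in range(len(cardList)-4):
--         for j in range(i + 1, len(cardList) - 3):
--             for k in range(j + 1, len(cardList) - 2):
--                 for l in range(k + 1, len(cardList) - 1):
--                     for m in range(l + 1, len(cardList)):
--                         board = [cardList[i], cardList[j], cardList[k], cardList[l], cardList[m]]
--                         boards.append(board)
--     return boards
-- ===== SOURCE B (Python) =====
-- def everyBoard(cardList):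
--     n = len(cardList)
--
--     def choose(start, k):
--         if k == 0:
--             return [[]]
--         res = []
--         for i in range(start, n - k + 1):
--             for rest in choose(i + 1, k - 1):
--                 res.append([cardList[i]] + rest)
--         return res
--
--     return choose(0, 5)
-- ===== Notes on version B (the rewrite author's own statement) =====
-- stated objective: simpler
-- what changed: Replaces the five hard-coded nested index loops with one recursive helper choose(start, k) that builds all k-element combinations from index start onward, returning choose(0, 5).
import Mathlib
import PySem

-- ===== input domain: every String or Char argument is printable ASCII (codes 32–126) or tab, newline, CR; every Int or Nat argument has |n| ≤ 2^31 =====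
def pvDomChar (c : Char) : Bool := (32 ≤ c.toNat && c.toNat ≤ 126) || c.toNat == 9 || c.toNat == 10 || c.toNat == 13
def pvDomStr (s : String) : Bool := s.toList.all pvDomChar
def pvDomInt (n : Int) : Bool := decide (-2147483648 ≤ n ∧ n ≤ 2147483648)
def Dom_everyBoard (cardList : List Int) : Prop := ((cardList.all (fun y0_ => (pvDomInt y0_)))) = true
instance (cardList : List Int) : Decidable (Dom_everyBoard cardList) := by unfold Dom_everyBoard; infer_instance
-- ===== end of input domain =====

-- B replaces A's five hard-coded nested index loops by one recursive helper choose(start, k); same output, simpler structure.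

-- ===== PORT A =====
-- literal transliteration of A's five nested index loops appending each 5-card board
def everyBoard (cardList : List Int) : List (List Int) :=
  let n : Int := cardList.length
  (PySem.List.pyRange 0 (n - 4) 1).foldl (fun boards i =>
    (PySem.List.pyRange (i + 1) (n - 3) 1).foldl (fun boards j =>
      (PySem.List.pyRange (j + 1) (n - 2) 1).foldl (fun boards k =>
        (PySem.List.pyRange (k + 1) (n - 1) 1).foldl (fun boards l =>
          (PySem.List.pyRange (l + 1) n 1).foldl (fun boards m =>
            boards ++ [[PySem.List.pyGetD cardList i 0, PySem.List.pyGetD cardList j 0,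
                        PySem.List.pyGetD cardList k 0, PySem.List.pyGetD cardList l 0,
                        PySem.List.pyGetD cardList m 0]]) boards) boards) boards) boards) []

-- ===== PORT B =====
-- transliteration of Source B's recursive helper choose(start, k)
def chooseFrom (cardList : List Int) (k : Nat) (start : Int) : List (List Int) :=
  match k with
  | 0 => [[]]
  | Nat.succ k' =>
    (PySem.List.pyRange start ((cardList.length : Int) - (k' + 1) + 1) 1).foldl
      (fun res i =>
        res ++ (chooseFrom cardList k' (i + 1)).map
          (fun rest => PySem.List.pyGetD cardList i 0 :: rest)) []

def everyBoard_alt (cardList : List Int) : List (List Int) :=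
  chooseFrom cardList 5 0

-- ===== PRECONDITION & SPEC =====
def Spec_everyBoard (cardList : List Int) (out : List (List Int)) : Prop := out = everyBoard_alt cardList
instance (cardList : List Int) (out : List (List Int)) : Decidable (Spec_everyBoard cardList out) := by unfold Spec_everyBoard; infer_instance

-- ===== CLAIM (what is proved, stated in full; the proofs are below) =====
def Claim_equal_everyBoard : Prop := ∀ (cardList : List Int), Dom_everyBoard cardList → Spec_everyBoard cardList (everyBoard cardList)

-- ===== LEMMAS AND PROOFS =====

theorem chooseFrom_succ (c : List Int) (k : Nat) (s : Int) :
    chooseFrom c (k + 1) s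
      = (PySem.List.pyRange s ((c.length : Int) - k) 1).flatMap
          (fun i => (chooseFrom c k (i + 1)).map
            (fun rest => PySem.List.pyGetD c i 0 :: rest)) := by
  have hb : ((c.length : Int) - (k + 1) + 1) = (c.length : Int) - k := by ring
  show (PySem.List.pyRange s ((c.length : Int) - (k + 1) + 1) 1).foldl _ [] = _
  rw [hb, PySem.List.foldl_append_eq_flatMap]
  simp

theorem chooseFrom_zero (c : List Int) (s : Int) : chooseFrom c 0 s = [[]] := rfl

-- ===== VERDICT (by name: the statement is the Claim_ definition above) =====
theorem everyBoard_spec : Claim_equal_everyBoard := by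
  intro cardList _
  unfold Spec_everyBoard everyBoard everyBoard_alt
  simp only [chooseFrom_succ, chooseFrom_zero, List.map_flatMap, List.map_map,
    PySem.List.foldl_append_eq_flatMap]
  norm_num [Function.comp]
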